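-- pv_equiv track=rewrite | github.com/14sxlin/PythonBackup | algorithm/常用算法深入学习实录/字符移动.py | move_star
-- ===== SOURCE A (Python) =====
-- def move_star(chars,target='*'):
--     """
--     将 * 往前移动, 字母往后移动, 保持顺序
--     :param chars:
--     :param target:
--     :return:
--     """
--     i = len(chars)-1   # 指向* 防卫指针: 指向的位置后面都是合法的
--     j = i               # 指向字母 扫描指针: 每次都移动,如果是符合字符,纳入防卫指针
--     while j >= 0:
--         if chars[i] != '*':     # 找到第一个 *
--             i -= 1
--         else:
--             # 如果 j 指向一个字母, 则交换
--             if chars[j] != '*':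
--                 chars[i] = chars[j]
--                 chars[j] = '*'
--                 i -= 1
--         j -= 1                      # 指向字母的指针往前移动
--     return "".join(chars)
-- ===== SOURCE B (Python) =====
-- # B: count-and-rebuild instead of A's two-pointer in-place swap partition.
-- # Like A, mutates the argument list in place to the same final contents.
-- def move_star(chars, target='*'):
--     letters = [c for c in chars if c != '*']
--     stars = len(chars) - len(letters)
--     chars[:] = ['*'] * stars + letters
--     return ''.join(chars)
-- ===== Notes on version B (the rewrite author's own statement) =====
-- stated objective: simpler
-- what changed: Replaces A's backwards two-pointer in-place swap partition with a single filter pass: keep the non-'*' elements in order, prepend one '*' per removed element, and rebuild the list/string.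
import Mathlib
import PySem

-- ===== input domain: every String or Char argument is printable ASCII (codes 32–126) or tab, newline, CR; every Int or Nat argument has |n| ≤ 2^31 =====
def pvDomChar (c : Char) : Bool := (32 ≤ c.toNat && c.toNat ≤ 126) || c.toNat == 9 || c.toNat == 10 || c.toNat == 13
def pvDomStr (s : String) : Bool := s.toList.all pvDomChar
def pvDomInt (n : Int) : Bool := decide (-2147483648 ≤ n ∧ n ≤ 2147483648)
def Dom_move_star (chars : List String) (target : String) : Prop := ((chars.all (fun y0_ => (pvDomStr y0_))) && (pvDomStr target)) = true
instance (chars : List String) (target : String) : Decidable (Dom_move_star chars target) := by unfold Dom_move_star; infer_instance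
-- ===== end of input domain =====

-- B replaces A's backwards two-pointer in-place swap partition with a single filter
-- pass (keep non-'*' elements in order, prepend the removed count of '*'s): simpler.
-- Both Pythons mutate the argument list to the same final contents; the theorems are
-- about the RETURN value.

-- ===== PORT A =====
-- A's while loop, ported as recursion on the fuel n = j + 1 (j = n - 1 is the Python
-- scan index, i the guard index; both are Python ints).  All indices touched are in
-- range for every list input, so pyGetD/pySetD's defaults are never used and A is
-- total here (target is unused by A's body).
def moveStarLoop (chars : List String) (i : Int) : Nat → List String
  | 0 => chars
  | n + 1 =>
    if PySem.List.pyGetD chars i "" ≠ "*" then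
      moveStarLoop chars (i - 1) n
    else
      if PySem.List.pyGetD chars (n : Int) "" ≠ "*" then
        moveStarLoop
          (PySem.List.pySetD (PySem.List.pySetD chars i (PySem.List.pyGetD chars (n : Int) "")) (n : Int) "*")
          (i - 1) n
      else
        moveStarLoop chars i n

def move_star (chars : List String) (target : String) : String :=
  PySem.Str.join "" (moveStarLoop chars ((chars.length : Int) - 1) chars.length)

-- ===== PORT B =====
def move_star_alt (chars : List String) (target : String) : String :=
  let letters := chars.filter (fun c => c != "*")
  let stars := chars.length - letters.length
  PySem.Str.join "" (List.replicate stars "*" ++ letters)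

-- ===== PRECONDITION & SPEC =====
def Spec_move_star (chars : List String) (target : String) (out : String) : Prop := out = move_star_alt chars target
instance (chars : List String) (target : String) (out : String) : Decidable (Spec_move_star chars target out) := by unfold Spec_move_star; infer_instance

-- ===== CLAIM (what is proved, stated in full; the proofs are below) =====
def Claim_equal_move_star : Prop := ∀ (chars : List String) (target : String), Dom_move_star chars target → Spec_move_star chars target (move_star chars target)

-- ===== LEMMAS AND PROOFS =====

-- getD at the junction of an append
theorem pyGetD_mid (pre ys : List String) (a d : String) :
    PySem.List.pyGetD (pre ++ a :: ys) ((pre.length : Nat) : Int) d = a := by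
  simp [List.getD_eq_getElem?_getD]

-- set at the junction of an append
theorem set_mid (pre ys : List String) (v : String) :
    (pre ++ ys).set pre.length v = pre ++ ys.set 0 v := by
  simp [List.set_append_right]

-- pySetD at the junction of an append
theorem pySetD_mid (pre ys : List String) (old v : String) :
    PySem.List.pySetD (pre ++ old :: ys) ((pre.length : Nat) : Int) v = pre ++ v :: ys := by
  rw [PySem.List.pySetD_natCast, set_mid, List.set_cons_zero]

-- Loop invariant: with n elements still to scan (j = n - 1), the list is
--   take n of the original ++ a block of '*'s (one per '*' already seen) ++ the
--   letters already seen, in order,  and i sits at the right edge of the star block.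
theorem moveStarLoop_inv (orig : List String) :
    ∀ n, n ≤ orig.length →
    moveStarLoop
      (orig.take n ++ List.replicate ((orig.drop n).countP (· == "*")) "*"
        ++ (orig.drop n).filter (fun c => c != "*"))
      ((n : Int) - 1 + ((orig.drop n).countP (· == "*") : Int)) n
    = List.replicate (orig.countP (· == "*")) "*" ++ orig.filter (fun c => c != "*") := by
  intro n
  induction n with
  | zero => intro _; simp [moveStarLoop]
  | succ n ih =>
    intro hn
    have hlt : n < orig.length := hn
    have ihn := ih (by omega)
    rw [List.drop_eq_getElem_cons hlt] at ihn
    rw [List.take_succ_eq_append_getElem hlt]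
    simp only [List.countP_cons, List.filter_cons] at ihn
    obtain ⟨a, ha⟩ : ∃ a, orig[n] = a := ⟨_, rfl⟩
    rw [ha] at ihn ⊢
    obtain ⟨S, hSdef⟩ : ∃ S, List.countP (fun x => x == "*") (List.drop (n + 1) orig) = S :=
      ⟨_, rfl⟩
    obtain ⟨F, hFdef⟩ : ∃ F, List.filter (fun c => c != "*") (List.drop (n + 1) orig) = F :=
      ⟨_, rfl⟩
    rw [hSdef, hFdef] at ihn ⊢
    have hntake : (orig.take n).length = n := by simp; omega
    by_cases hA : a = "*"
    · -- scanned element is a star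
      subst hA
      simp only [beq_self_eq_true, if_true, bne_self_eq_false, Bool.false_eq_true,
        if_false] at ihn
      simp only [moveStarLoop]
      rcases Nat.eq_zero_or_pos S with hS | hS
      · -- i = j = n, chars[i] = "*" and chars[j] = "*"
        subst hS
        have hg := pyGetD_mid (orig.take n) (List.replicate 0 "*" ++ F) "*" ""
        rw [hntake] at hg
        have hi1 : ((n + 1 : Nat) : Int) - 1 + ((0 : Nat) : Int) = ((n : Nat) : Int) := by
          push_cast; ring
        simp only [List.cons_append, List.nil_append, List.replicate_zero,
          List.append_assoc] at hg ⊢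
        rw [hi1, hg]
        simp only [ne_eq, not_true_eq_false, if_false]
        simpa using ihn
      · -- chars[i] = "*" (inside the star block) and chars[j] = "*"
        obtain ⟨S', rfl⟩ : ∃ S', S = S' + 1 := ⟨S - 1, by omega⟩
        have hplen : (orig.take n ++ ("*" : String) :: List.replicate S' "*").length
            = n + (S' + 1) := by simp [hntake]
        have hi1 : ((n + 1 : Nat) : Int) - 1 + ((S' + 1 : Nat) : Int)
            = ((n + (S' + 1) : Nat) : Int) := by push_cast; ring
        have hre : orig.take n ++ ("*" : String) :: (List.replicate (S' + 1) "*" ++ F)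
            = (orig.take n ++ ("*" : String) :: List.replicate S' "*") ++ ("*" : String) :: F := by
          simp [List.replicate_succ']
        have hgi := pyGetD_mid (orig.take n ++ ("*" : String) :: List.replicate S' "*") F "*" ""
        rw [hplen] at hgi
        have hgj := pyGetD_mid (orig.take n) (List.replicate S' "*" ++ ("*" : String) :: F) "*" ""
        rw [hntake] at hgj
        simp only [List.cons_append, List.nil_append, List.append_assoc] at hre hgi hgj ⊢
        rw [hi1, hre, hgi, hgj]
        simp only [ne_eq, not_true_eq_false, if_false]
        have hi2 : ((n + (S' + 1) : Nat) : Int)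
            = ((n : Nat) : Int) - 1 + ((S' + 1 + 1 : Nat) : Int) := by push_cast; ring
        rw [hi2, ← hre]
        simpa [List.replicate_succ] using ihn
    · -- scanned element is a letter
      have hbeq : (a == "*") = false := by simpa using hA
      have hbne : (a != "*") = true := by simpa using hA
      simp only [hbeq, hbne, Bool.false_eq_true, if_false, if_true, Nat.add_zero] at ihn
      simp only [moveStarLoop]
      rcases Nat.eq_zero_or_pos S with hS | hS
      · -- i = j = n, chars[i] = a ≠ "*": only i and j move
        subst hS
        have hg := pyGetD_mid (orig.take n) (List.replicate 0 "*" ++ F) a ""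
        rw [hntake] at hg
        have hi1 : ((n + 1 : Nat) : Int) - 1 + ((0 : Nat) : Int) = ((n : Nat) : Int) := by
          push_cast; ring
        simp only [List.cons_append, List.nil_append, List.replicate_zero,
          List.append_assoc] at hg ⊢
        rw [hi1, hg, if_pos hA]
        have hi2 : ((n : Nat) : Int) - 1 = ((n : Nat) : Int) - 1 + ((0 : Nat) : Int) := by
          push_cast; ring
        rw [hi2]
        simpa using ihn
      · -- chars[i] = "*" (inside the star block), chars[j] = a ≠ "*": swap
        obtain ⟨S', rfl⟩ : ∃ S', S = S' + 1 := ⟨S - 1, by omega⟩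
        have hplen : (orig.take n ++ a :: List.replicate S' "*").length = n + (S' + 1) := by
          simp [hntake]
        have hi1 : ((n + 1 : Nat) : Int) - 1 + ((S' + 1 : Nat) : Int)
            = ((n + (S' + 1) : Nat) : Int) := by push_cast; ring
        have hre : orig.take n ++ a :: (List.replicate (S' + 1) "*" ++ F)
            = (orig.take n ++ a :: List.replicate S' "*") ++ ("*" : String) :: F := by
          simp [List.replicate_succ']
        have hgi := pyGetD_mid (orig.take n ++ a :: List.replicate S' "*") F "*" ""
        rw [hplen] at hgi
        have hgj := pyGetD_mid (orig.take n) (List.replicate S' "*" ++ ("*" : String) :: F) a ""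
        rw [hntake] at hgj
        -- the two assignments: the last '*' of the block becomes a, position j becomes '*'
        have hs1 := pySetD_mid (orig.take n ++ a :: List.replicate S' "*") F "*" a
        rw [hplen] at hs1
        have hs2 := pySetD_mid (orig.take n) (List.replicate S' "*" ++ a :: F) a "*"
        rw [hntake] at hs2
        simp only [List.cons_append, List.nil_append, List.append_assoc] at hre hgi hgj hs1 hs2 ⊢
        rw [hi1, hre, hgi, hgj]
        simp only [ne_eq, not_true_eq_false, if_false]
        rw [if_pos hA, hs1, hs2]
        have hi2 : ((n + (S' + 1) : Nat) : Int) - 1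
            = ((n : Nat) : Int) - 1 + ((S' + 1 : Nat) : Int) := by push_cast; ring
        rw [hi2]
        simpa [List.replicate_succ] using ihn

theorem move_star_spec' (chars : List String) (target : String) :
    move_star chars target = move_star_alt chars target := by
  have h := moveStarLoop_inv chars chars.length le_rfl
  simp only [List.take_length, List.drop_length, List.countP_nil, List.filter_nil,
    List.replicate_zero, List.append_nil, Nat.cast_zero, add_zero] at h
  unfold move_star move_star_alt
  rw [h]
  have hcnt : chars.countP (· == "*")
      = chars.length - (chars.filter (fun c => c != "*")).length := by
    have h2 : chars.length = (chars.filter (fun c => c == "*")).length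
        + (chars.filter (fun c => c != "*")).length := by
      have := List.length_eq_length_filter_add (l := chars) (fun c : String => c == "*")
      simpa [bne] using this
    rw [List.countP_eq_length_filter]
    omega
  rw [hcnt]

-- ===== VERDICT (by name: the statement is the Claim_ definition above) =====
theorem move_star_spec : Claim_equal_move_star := by
  intro chars target _
  exact move_star_spec' chars target
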